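-- pv_equiv track=rewrite | github.com/UCLA-StarAI/pysmi | pysmi/utils.py | path_relabel
-- ===== SOURCE A (Python) =====
-- def path_relabel(n):
--     from collections import deque
--     que = deque([[i for i in range(n)]])
--     count = level = 0
--     node_level = dict()
--     mapping = dict()
--     while que:
--         for _ in range(len(que)):
--             sub = que.popleft()
--             mid = len(sub) // 2
--             mapping[sub[mid]] = count
--             node_level[sub[mid]] = level
--             count += 1
--             left = sub[:mid]
--             right = sub[mid + 1:]
--             if left:
--                 que.append(left)
--             if right:
--                 que.append(right)
--         level += 1
--     return mapping, node_level
-- ===== SOURCE B (Python) =====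
-- def path_relabel(n):
--     # Flat worklist of (lo, hi, level) bounds triples scanned by an index pointer:
--     # no sublist materialisation/slicing and no per-level inner loop.
--     intervals = [(0, n, 0)] if n > 0 else []
--     mapping = {}
--     node_level = {}
--     count = 0
--     i = 0
--     while i < len(intervals):
--         lo, hi, lev = intervals[i]
--         i += 1
--         mid = lo + (hi - lo) // 2
--         mapping[mid] = count
--         node_level[mid] = lev
--         count += 1
--         if lo < mid:
--             intervals.append((lo, mid, lev + 1))
--         if mid + 1 < hi:
--             intervals.append((mid + 1, hi, lev + 1))
--     return mapping, node_level
-- ===== Notes on version B (the rewrite author's own statement) =====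
-- stated objective: alternative
-- what changed: replaces the deque of materialised index sublists and the per-level inner for-loop with a flat worklist of (lo,hi,level) bounds triples scanned by an index pointer, so no sublist is ever sliced or copied and the level is carried in the queue entry instead of being counted per round
-- outside the precondition, e.g. on path_relabel(0): A raises IndexError, B returns ({}, {})
import Mathlib
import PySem

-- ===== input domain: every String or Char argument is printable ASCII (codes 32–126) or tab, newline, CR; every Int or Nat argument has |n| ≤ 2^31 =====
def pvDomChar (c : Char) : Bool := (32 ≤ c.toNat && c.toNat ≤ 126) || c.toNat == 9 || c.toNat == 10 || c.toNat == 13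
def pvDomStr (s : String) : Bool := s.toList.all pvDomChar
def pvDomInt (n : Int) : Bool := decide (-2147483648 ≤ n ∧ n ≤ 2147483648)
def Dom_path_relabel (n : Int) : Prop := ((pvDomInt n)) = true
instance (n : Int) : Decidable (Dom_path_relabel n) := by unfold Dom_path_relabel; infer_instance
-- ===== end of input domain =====

-- B replaces A's deque of materialised index sublists (and its per-level inner loop) by a flat
-- worklist of (lo,hi,level) bounds triples scanned with an index pointer: no slicing/copying.

-- ===== PORT A =====
-- inner 'for _ in range(len(que))' body of A's while-loop; k = number of iterations left.
-- On the IndexError path (sub empty, pyGet? = none, only reachable for n ≤ 0, outside Pre_)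
-- we return an empty queue so the outer loop stops; those inputs are excluded by Pre_.
def pathAInner : Nat → List (List Int) → Int → Int → PySem.Dict Int Int → PySem.Dict Int Int →
    List (List Int) × Int × PySem.Dict Int Int × PySem.Dict Int Int
  | 0, que, count, _, mp, nl => (que, count, mp, nl)
  | Nat.succ k, que, count, level, mp, nl =>
    match que with
    | [] => ([], count, mp, nl)
    | sub :: rest =>
      let mid : Int := PySem.Int.floordiv (sub.length : Int) 2
      match PySem.List.pyGet? sub mid with
      | none => ([], count, mp, nl)
      | some v =>
        let mp' := mp.insert v count
        let nl' := nl.insert v level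
        let left := PySem.List.slice sub none (some mid)
        let right := PySem.List.slice sub (some (mid + 1)) none
        let que' := rest ++ (if left ≠ [] then [left] else []) ++ (if right ≠ [] then [right] else [])
        pathAInner k que' (count + 1) level mp' nl'

-- the 'while que:' loop; fuel bounds the number of outer rounds (levels), a pure totality guard.
def pathAOuter : Nat → List (List Int) → Int → Int → PySem.Dict Int Int → PySem.Dict Int Int →
    PySem.Dict Int Int × PySem.Dict Int Int
  | 0, _, _, _, mp, nl => (mp, nl)
  | Nat.succ f, que, count, level, mp, nl =>
    match que with
    | [] => (mp, nl)
    | q :: qs =>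
      let r := pathAInner (q :: qs).length (q :: qs) count level mp nl
      pathAOuter f r.1 r.2.1 (level + 1) r.2.2.1 r.2.2.2

def path_relabel (n : Int) : (List (Int × Int)) × (List (Int × Int)) :=
  let res := pathAOuter (n.toNat + 1) [PySem.List.pyRange 0 n 1] 0 0 PySem.Dict.empty PySem.Dict.empty
  (res.1.items, res.2.items)

-- ===== PORT B =====
-- 'while i < len(intervals):' of Source B; one fuel unit per processed node (totality guard).
def pathBLoop : Nat → List (Int × Int × Int) → Nat → Int → PySem.Dict Int Int → PySem.Dict Int Int →
    PySem.Dict Int Int × PySem.Dict Int Int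
  | 0, _, _, _, mp, nl => (mp, nl)
  | Nat.succ f, intervals, i, count, mp, nl =>
    if h : i < intervals.length then
      let t := intervals[i]
      let mid := t.1 + PySem.Int.floordiv (t.2.1 - t.1) 2
      let mp' := mp.insert mid count
      let nl' := nl.insert mid t.2.2
      let intervals' := intervals
        ++ (if t.1 < mid then [(t.1, mid, t.2.2 + 1)] else [])
        ++ (if mid + 1 < t.2.1 then [(mid + 1, t.2.1, t.2.2 + 1)] else [])
      pathBLoop f intervals' (i + 1) (count + 1) mp' nl'
    else (mp, nl)

def path_relabel_alt (n : Int) : (List (Int × Int)) × (List (Int × Int)) :=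
  let res := pathBLoop (n.toNat + 1) (if 0 < n then [(0, n, 0)] else []) 0 0
    PySem.Dict.empty PySem.Dict.empty
  (res.1.items, res.2.items)

-- ===== PRECONDITION & SPEC =====
-- Pre_ excludes exactly n ≤ 0, where A raises IndexError (it enqueues the empty list and indexes it).
def Pre_path_relabel (n : Int) : Prop := 1 ≤ n
instance (n : Int) : Decidable (Pre_path_relabel n) := by unfold Pre_path_relabel; infer_instance
def pvWitness_path_relabel : Int := 3

def Spec_path_relabel (n : Int) (out : (List (Int × Int)) × (List (Int × Int))) : Prop := out = path_relabel_alt n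
instance (n : Int) (out : (List (Int × Int)) × (List (Int × Int))) : Decidable (Spec_path_relabel n out) := by unfold Spec_path_relabel; infer_instance

-- ===== CLAIM (what is proved, stated in full; the proofs are below) =====
def Claim_equal_path_relabel : Prop := ∀ (n : Int), Dom_path_relabel n → Pre_path_relabel n → Spec_path_relabel n (path_relabel n)

-- ===== LEMMAS AND PROOFS =====

-- the interval a queue entry of A denotes
def pvRangeOf (p : Int × Int × Int) : List Int := PySem.List.pyRange p.1 p.2.1 1

-- total number of indices still pending
def pvMass : List (Int × Int × Int) → Nat
  | [] => 0
  | p :: t => (p.2.1 - p.1).toNat + pvMass t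

-- common flat BFS over bounds triples, always run with fuel = pvMass of its pending list
def pvBfs : Nat → List (Int × Int × Int) → Int → PySem.Dict Int Int → PySem.Dict Int Int →
    PySem.Dict Int Int × PySem.Dict Int Int
  | 0, _, _, mp, nl => (mp, nl)
  | Nat.succ _, [], _, mp, nl => (mp, nl)
  | Nat.succ f, t :: rest, count, mp, nl =>
    let mid := t.1 + PySem.Int.floordiv (t.2.1 - t.1) 2
    pvBfs f (rest ++ (if t.1 < mid then [(t.1, mid, t.2.2 + 1)] else [])
                  ++ (if mid + 1 < t.2.1 then [(mid + 1, t.2.1, t.2.2 + 1)] else []))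
      (count + 1) (mp.insert mid count) (nl.insert mid t.2.2)

lemma pvBfs_nil (f : Nat) (c : Int) (mp nl : PySem.Dict Int Int) :
    pvBfs f [] c mp nl = (mp, nl) := by cases f <;> rfl

lemma pvMass_append (a b : List (Int × Int × Int)) :
    pvMass (a ++ b) = pvMass a + pvMass b := by
  induction a with
  | nil => simp [pvMass]
  | cons p t ih => simp [pvMass, ih]; omega

lemma pvMass_eq_zero (l : List (Int × Int × Int)) (h : ∀ p ∈ l, p.1 < p.2.1)
    (hm : pvMass l = 0) : l = [] := by
  cases l with
  | nil => rfl
  | cons p t =>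
    exfalso
    have hp := h p (by simp)
    simp [pvMass] at hm
    omega

lemma pvRange_ne_nil (a b : Int) (h : a < b) : PySem.List.pyRange a b 1 ≠ [] := by
  rw [PySem.List.pyRange_one_cons h]; simp

lemma pvFloordiv_toNat (lo hi : Int) (h : lo ≤ hi) :
    PySem.Int.floordiv (hi - lo) 2 = (((hi - lo).toNat / 2 : Nat) : Int) := by
  have h1 : hi - lo = (((hi - lo).toNat : Nat) : Int) := by omega
  rw [h1]
  exact_mod_cast PySem.Int.floordiv_natCast (hi - lo).toNat 2

lemma pvMass_push (lo hi lv m : Int) (h : lo < hi)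
    (hm : m = lo + PySem.Int.floordiv (hi - lo) 2) :
    pvMass ((if lo < m then [(lo, m, lv + 1)] else [])
        ++ (if m + 1 < hi then [(m + 1, hi, lv + 1)] else [])) + 1
      = (hi - lo).toNat := by
  rw [PySem.Int.floordiv_eq_ediv_of_pos (by omega : (0:Int) < 2)] at hm
  subst hm
  split_ifs <;> simp [pvMass] <;> omega

lemma pvTake_range (lo hi : Int) (mN : Nat) (h2 : lo + (mN : Int) ≤ hi) :
    (PySem.List.pyRange lo hi 1).take mN = PySem.List.pyRange lo (lo + (mN : Int)) 1 := by
  rw [PySem.List.pyRange_one_append lo (lo + (mN : Int)) hi (by omega) h2]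
  exact List.take_left' (by rw [PySem.List.length_pyRange_one]; omega)

lemma pvDrop_range (lo hi : Int) (mN : Nat) (h2 : lo + (mN : Int) ≤ hi) :
    (PySem.List.pyRange lo hi 1).drop mN = PySem.List.pyRange (lo + (mN : Int)) hi 1 := by
  rw [PySem.List.pyRange_one_append lo (lo + (mN : Int)) hi (by omega) h2]
  exact List.drop_left' (by rw [PySem.List.length_pyRange_one]; omega)

lemma pathAInner_sim : ∀ (k : Nat) (pend : List (Int × Int × Int)) (c lv : Int)
    (mp nl : PySem.Dict Int Int),
    k ≤ pend.length →
    (∀ p ∈ pend, p.1 < p.2.1) →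
    (∀ p ∈ pend.take k, p.2.2 = lv) →
    (∀ p ∈ pend.drop k, p.2.2 = lv + 1) →
    ∃ pend' c' mp' nl',
      pathAInner k (pend.map pvRangeOf) c lv mp nl = (pend'.map pvRangeOf, c', mp', nl') ∧
      pvBfs (pvMass pend) pend c mp nl = pvBfs (pvMass pend') pend' c' mp' nl' ∧
      (∀ p ∈ pend', p.1 < p.2.1 ∧ p.2.2 = lv + 1) ∧
      pvMass pend' + k = pvMass pend := by
  intro k
  induction k with
  | zero =>
    intro pend c lv mp nl _ hlt _ hdrop
    exact ⟨pend, c, mp, nl, rfl, rfl,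
      fun p hp => ⟨hlt p hp, hdrop p (by simpa using hp)⟩, by omega⟩
  | succ k ih =>
    intro pend c lv mp nl hk hlt htake hdrop
    match pend with
    | [] => simp at hk
    | ⟨lo, hi, lv0⟩ :: rest =>
      have hlo : lo < hi := hlt ⟨lo, hi, lv0⟩ (by simp)
      have hlv : lv0 = lv := by
        have := htake ⟨lo, hi, lv0⟩ (by simp [List.take_succ_cons])
        simpa using this
      subst hlv
      -- abbreviations
      have hlen : (pvRangeOf ⟨lo, hi, lv0⟩).length = (hi - lo).toNat :=
        PySem.List.length_pyRange_one lo hi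
      have hfd : PySem.Int.floordiv (hi - lo) 2 = (((hi - lo).toNat / 2 : Nat) : Int) :=
        pvFloordiv_toNat lo hi (le_of_lt hlo)
      have hmlt : (hi - lo).toNat / 2 < (hi - lo).toNat := by omega
      have hmid : PySem.Int.floordiv (((pvRangeOf ⟨lo, hi, lv0⟩).length : Nat) : Int) 2
          = (((hi - lo).toNat / 2 : Nat) : Int) := by
        rw [hlen]
        exact_mod_cast PySem.Int.floordiv_natCast (hi - lo).toNat 2
      have hget : PySem.List.pyGet? (pvRangeOf ⟨lo, hi, lv0⟩) (((hi - lo).toNat / 2 : Nat) : Int)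
          = some (lo + ((hi - lo).toNat / 2 : Nat)) := by
        rw [PySem.List.pyGet?_natCast]
        unfold pvRangeOf
        rw [PySem.List.getElem?_pyRange_one, if_pos (by omega)]
      have hleft : PySem.List.slice (pvRangeOf ⟨lo, hi, lv0⟩) none (some (((hi - lo).toNat / 2 : Nat) : Int))
          = PySem.List.pyRange lo (lo + (((hi - lo).toNat / 2 : Nat) : Int)) 1 := by
        rw [PySem.List.slice_to_natCast]
        exact pvTake_range lo hi _ (by omega)
      have hright : PySem.List.slice (pvRangeOf ⟨lo, hi, lv0⟩) (some ((((hi - lo).toNat / 2 : Nat) : Int) + 1)) none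
          = PySem.List.pyRange (lo + (((hi - lo).toNat / 2 : Nat) : Int) + 1) hi 1 := by
        have hcast : ((((hi - lo).toNat / 2 : Nat) : Int) + 1) = (((hi - lo).toNat / 2 + 1 : Nat) : Int) := by
          push_cast; ring
        rw [hcast, PySem.List.slice_from_natCast]
        have h := pvDrop_range lo hi ((hi - lo).toNat / 2 + 1) (by omega)
        rw [show lo + (((hi - lo).toNat / 2 + 1 : Nat) : Int)
            = lo + (((hi - lo).toNat / 2 : Nat) : Int) + 1 by push_cast; ring] at h
        exact h
      -- the new pending list
      have hm' : lo + (((hi - lo).toNat / 2 : Nat) : Int)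
          = lo + PySem.Int.floordiv (hi - lo) 2 := by rw [hfd]
      refine ?_
      set m : Int := lo + (((hi - lo).toNat / 2 : Nat) : Int) with hm
      set pushA : List (Int × Int × Int) := if lo < m then [(lo, m, lv0 + 1)] else [] with hpa
      set pushB : List (Int × Int × Int) := if m + 1 < hi then [(m + 1, hi, lv0 + 1)] else [] with hpb
      have hLmap : (if PySem.List.pyRange lo m 1 ≠ [] then [PySem.List.pyRange lo m 1] else [])
          = pushA.map pvRangeOf := by
        by_cases h0 : lo < m
        · simp [hpa, h0, pvRange_ne_nil lo m h0, pvRangeOf]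
        · simp [hpa, h0, PySem.List.pyRange_one_eq_nil (by omega : m ≤ lo)]
      have hRmap : (if PySem.List.pyRange (m + 1) hi 1 ≠ [] then [PySem.List.pyRange (m + 1) hi 1] else [])
          = pushB.map pvRangeOf := by
        by_cases h0 : m + 1 < hi
        · simp [hpb, h0, pvRange_ne_nil (m + 1) hi h0, pvRangeOf]
        · simp [hpb, h0, PySem.List.pyRange_one_eq_nil (by omega : hi ≤ m + 1)]
      -- one step of the A port
      have hstep : pathAInner (k + 1) ((⟨lo, hi, lv0⟩ :: rest).map pvRangeOf) c lv0 mp nl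
          = pathAInner k ((rest ++ pushA ++ pushB).map pvRangeOf) (c + 1)
              lv0 (mp.insert m c) (nl.insert m lv0) := by
        simp only [List.map_cons, pathAInner]
        rw [hmid, hget, hleft, hright, hLmap, hRmap]
        simp [List.map_append]
      -- one step of the spec
      have hmass : pvMass (⟨lo, hi, lv0⟩ :: rest) = pvMass (rest ++ pushA ++ pushB) + 1 := by
        have hp := pvMass_push lo hi lv0 m hlo hm'
        rw [← hpa, ← hpb] at hp
        have h2 : pvMass (rest ++ pushA ++ pushB) = pvMass rest + pvMass (pushA ++ pushB) := by
          rw [List.append_assoc, pvMass_append]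
        simp only [pvMass]
        omega
      have hspec : pvBfs (pvMass (⟨lo, hi, lv0⟩ :: rest)) (⟨lo, hi, lv0⟩ :: rest) c mp nl
          = pvBfs (pvMass (rest ++ pushA ++ pushB)) (rest ++ pushA ++ pushB) (c + 1)
              (mp.insert m c) (nl.insert m lv0) := by
        rw [hmass]
        simp only [pvBfs]
        rw [← hm', ← hpa, ← hpb]
      -- invariants for the IH
      have hk' : k ≤ (rest ++ pushA ++ pushB).length := by
        simp only [List.length_append]
        have : k ≤ rest.length := by simpa using hk
        omega
      have hlt' : ∀ p ∈ rest ++ pushA ++ pushB, p.1 < p.2.1 := by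
        intro p hp
        rcases List.mem_append.1 hp with hp | hp
        · rcases List.mem_append.1 hp with hp | hp
          · exact hlt p (by simp [hp])
          · rcases hpa ▸ hp with hp
            by_cases h0 : lo < m <;> simp [h0] at hp
            subst hp; simpa using h0
        · rcases hpb ▸ hp with hp
          by_cases h0 : m + 1 < hi <;> simp [h0] at hp
          subst hp; simpa using h0
      have htake' : ∀ p ∈ (rest ++ pushA ++ pushB).take k, p.2.2 = lv0 := by
        intro p hp
        rw [List.append_assoc, List.take_append_of_le_length (by simpa using hk)] at hp
        exact htake p (by simp [List.take_succ_cons, hp])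
      have hdrop' : ∀ p ∈ (rest ++ pushA ++ pushB).drop k, p.2.2 = lv0 + 1 := by
        intro p hp
        rw [List.append_assoc, List.drop_append_of_le_length (by simpa using hk)] at hp
        rcases List.mem_append.1 hp with hp | hp
        · exact hdrop p (by simpa using hp)
        · rcases List.mem_append.1 hp with hp | hp
          · rcases hpa ▸ hp with hp
            by_cases h0 : lo < m <;> simp [h0] at hp
            subst hp; rfl
          · rcases hpb ▸ hp with hp
            by_cases h0 : m + 1 < hi <;> simp [h0] at hp
            subst hp; rfl
      obtain ⟨pend', c', mp', nl', he1, he2, he3, he4⟩ :=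
        ih (rest ++ pushA ++ pushB) (c + 1) lv0 (mp.insert m c) (nl.insert m lv0)
          hk' hlt' htake' hdrop'
      exact ⟨pend', c', mp', nl', by rw [hstep, he1], by rw [hspec, he2], he3, by omega⟩

lemma pathAOuter_sim : ∀ (f : Nat) (pend : List (Int × Int × Int)) (c lv : Int)
    (mp nl : PySem.Dict Int Int),
    (∀ p ∈ pend, p.1 < p.2.1 ∧ p.2.2 = lv) →
    pvMass pend ≤ f →
    pathAOuter f (pend.map pvRangeOf) c lv mp nl = pvBfs (pvMass pend) pend c mp nl := by
  intro f
  induction f with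
  | zero =>
    intro pend c lv mp nl hinv hf
    have : pend = [] := pvMass_eq_zero pend (fun p hp => (hinv p hp).1) (by omega)
    subst this
    rfl
  | succ f ih =>
    intro pend c lv mp nl hinv hf
    match pend with
    | [] => simp [pathAOuter, pvBfs_nil]
    | p :: rest =>
      obtain ⟨pend', c', mp', nl', he1, he2, he3, he4⟩ :=
        pathAInner_sim (p :: rest).length (p :: rest) c lv mp nl (le_refl _)
          (fun q hq => (hinv q hq).1)
          (fun q hq => (hinv q (List.mem_of_mem_take hq)).2)
          (fun q hq => by simp at hq)
      have hmge : 1 ≤ pvMass (p :: rest) := by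
        have := (hinv p (by simp)).1
        simp only [pvMass]
        omega
      simp only [List.map_cons, List.length_cons] at he1 he4
      have hstep : pathAOuter (f + 1) (pvRangeOf p :: rest.map pvRangeOf) c lv mp nl
          = pathAOuter f (pend'.map pvRangeOf) c' (lv + 1) mp' nl' := by
        simp only [pathAOuter, List.length_cons, List.length_map]
        rw [he1]
      simp only [List.map_cons]
      rw [hstep, ih pend' c' (lv + 1) mp' nl' he3 (by omega), ← he2]

lemma pathBLoop_sim : ∀ (f : Nat) (intervals : List (Int × Int × Int)) (i : Nat) (c : Int)
    (mp nl : PySem.Dict Int Int),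
    i ≤ intervals.length →
    (∀ p ∈ intervals.drop i, p.1 < p.2.1) →
    pvMass (intervals.drop i) ≤ f →
    pathBLoop f intervals i c mp nl = pvBfs (pvMass (intervals.drop i)) (intervals.drop i) c mp nl := by
  intro f
  induction f with
  | zero =>
    intro intervals i c mp nl hi hlt hf
    have : intervals.drop i = [] := pvMass_eq_zero _ hlt (by omega)
    rw [this]
    rfl
  | succ f ih =>
    intro intervals i c mp nl hi hlt hf
    by_cases hlen : i < intervals.length
    · have hdrop : intervals.drop i = intervals[i] :: intervals.drop (i + 1) :=
        List.drop_eq_getElem_cons hlen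
      have hmem : intervals[i] ∈ intervals.drop i := hdrop ▸ List.mem_cons_self
      have hlo : intervals[i].1 < intervals[i].2.1 := hlt _ hmem
      set t := intervals[i] with ht
      set m : Int := t.1 + PySem.Int.floordiv (t.2.1 - t.1) 2 with hm
      set pushA : List (Int × Int × Int) := if t.1 < m then [(t.1, m, t.2.2 + 1)] else [] with hpa
      set pushB : List (Int × Int × Int) := if m + 1 < t.2.1 then [(m + 1, t.2.1, t.2.2 + 1)] else [] with hpb
      have hmassp := pvMass_push t.1 t.2.1 t.2.2 m hlo hm
      have hmass : pvMass (intervals.drop i)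
          = pvMass (intervals.drop (i + 1) ++ pushA ++ pushB) + 1 := by
        rw [← hpa, ← hpb] at hmassp
        have h2 : pvMass (intervals.drop (i + 1) ++ pushA ++ pushB)
            = pvMass (intervals.drop (i + 1)) + pvMass (pushA ++ pushB) := by
          rw [List.append_assoc, pvMass_append]
        rw [hdrop]
        simp only [pvMass]
        omega
      have hstep : pathBLoop (f + 1) intervals i c mp nl
          = pathBLoop f (intervals ++ pushA ++ pushB) (i + 1) (c + 1)
              (mp.insert m c) (nl.insert m t.2.2) := by
        simp only [pathBLoop]
        rw [dif_pos hlen]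
      have hspec : pvBfs (pvMass (intervals.drop i)) (intervals.drop i) c mp nl
          = pvBfs (pvMass (intervals.drop (i + 1) ++ pushA ++ pushB))
              (intervals.drop (i + 1) ++ pushA ++ pushB) (c + 1)
              (mp.insert m c) (nl.insert m t.2.2) := by
        rw [hmass, hdrop]
        simp only [pvBfs]
        rw [← hm, ← hpa, ← hpb, List.append_assoc]
      have hdr : (intervals ++ pushA ++ pushB).drop (i + 1)
          = intervals.drop (i + 1) ++ pushA ++ pushB := by
        rw [List.append_assoc, List.drop_append_of_le_length (by omega), List.append_assoc]
      have hlt' : ∀ p ∈ (intervals ++ pushA ++ pushB).drop (i + 1), p.1 < p.2.1 := by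
        rw [hdr]
        intro p hp
        rcases List.mem_append.1 hp with hp | hp
        · rcases List.mem_append.1 hp with hp | hp
          · exact hlt p (by rw [hdrop]; simp [hp])
          · rcases hpa ▸ hp with hp
            by_cases h0 : t.1 < m <;> simp [h0] at hp
            subst hp; simpa using h0
        · rcases hpb ▸ hp with hp
          by_cases h0 : m + 1 < t.2.1 <;> simp [h0] at hp
          subst hp; simpa using h0
      have hf' : pvMass ((intervals ++ pushA ++ pushB).drop (i + 1)) ≤ f := by
        rw [hdr]; omega
      have hi' : i + 1 ≤ (intervals ++ pushA ++ pushB).length := by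
        simp only [List.length_append]; omega
      rw [hstep, ih (intervals ++ pushA ++ pushB) (i + 1) (c + 1)
        (mp.insert m c) (nl.insert m t.2.2) hi' hlt' hf', hdr, hspec]
    · have : intervals.drop i = [] := List.drop_eq_nil_of_le (by omega)
      rw [this, pvBfs_nil]
      simp only [pathBLoop]
      rw [dif_neg hlen]

-- ===== VERDICT (by name: the statement is the Claim_ definition above) =====
theorem path_relabel_spec : Claim_equal_path_relabel := by
  unfold Claim_equal_path_relabel
  intro n _ hpre
  unfold Pre_path_relabel at hpre
  have h0 : (0:Int) < n := by omega
  have hA : pathAOuter (n.toNat + 1) [PySem.List.pyRange 0 n 1] 0 0 PySem.Dict.empty PySem.Dict.empty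
      = pvBfs (pvMass [((0:Int), n, (0:Int))]) [((0:Int), n, (0:Int))] 0 PySem.Dict.empty PySem.Dict.empty := by
    have := pathAOuter_sim (n.toNat + 1) [((0:Int), n, (0:Int))] 0 0 PySem.Dict.empty PySem.Dict.empty
      (by intro p hp; simp at hp; subst hp; exact ⟨h0, rfl⟩) (by simp [pvMass])
    simpa [pvRangeOf] using this
  have hB : pathBLoop (n.toNat + 1) [((0:Int), n, (0:Int))] 0 0 PySem.Dict.empty PySem.Dict.empty
      = pvBfs (pvMass [((0:Int), n, (0:Int))]) [((0:Int), n, (0:Int))] 0 PySem.Dict.empty PySem.Dict.empty := by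
    have := pathBLoop_sim (n.toNat + 1) [((0:Int), n, (0:Int))] 0 0 PySem.Dict.empty PySem.Dict.empty
      (by simp) (by intro p hp; simp at hp; subst hp; exact h0) (by simp [pvMass])
    simpa using this
  unfold Spec_path_relabel path_relabel path_relabel_alt
  rw [if_pos h0, hA, hB]
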